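-- pv_equiv track=rewrite | github.com/thalida/adventofcode | 2020/day-4/part1.py | process
-- ===== SOURCE A (Python) =====
-- valid_keys = [
--   'byr', #(Birth Year)
--   'iyr', #(Issue Year)
--   'eyr', #(Expiration Year)
--   'hgt', #(Height)
--   'hcl', #(Hair Color)
--   'ecl', #(Eye Color)
--   'pid', #(Passport ID)
--   'cid', #(Country ID)
-- ]
--
-- def process(inputs):
--   valid_count = 0
--   found_keys = []
--   inputs = inputs + ['']
--
--   for line in inputs:
--     parts = line.split(' ')
--
--     if len(line) == 0:
--       if len(found_keys) > 0:
--         missing_keys = list(set(valid_keys) - set(found_keys))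
--         if ((len(missing_keys) == 0) or
--             (len(missing_keys) == 1 and missing_keys[0] == 'cid')):
--           valid_count += 1
--
--       found_keys = []
--       continue
--
--     for kv in parts:
--       k = kv.split(':')[0]
--       found_keys.append(k)
--
--   return valid_count
-- ===== SOURCE B (Python) =====
-- REQUIRED = ('byr', 'iyr', 'eyr', 'hgt', 'hcl', 'ecl', 'pid')
--
-- def process(inputs):
--   # inverted index: for each required key, the set of record ids it occurs in;
--   # a record id is the number of empty lines seen before the line
--   occ = {k: set() for k in REQUIRED}
--   block = 0
--   for line in inputs:
--     if len(line) == 0: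
--       block += 1
--     else:
--       for tok in line.split(' '):
--         k = tok.split(':')[0]
--         if k in occ:
--           occ[k].add(block)
--   # a record is valid iff its id lies in every key's set
--   common = occ[REQUIRED[0]]
--   for k in REQUIRED[1:]:
--     common = common & occ[k]
--   return len(common)
-- ===== Notes on version B (the rewrite author's own statement) =====
-- stated objective: alternative
-- what changed: B replaces A's per-record key accumulator and set-difference/cid test by an inverted index: one dict mapping each of the 7 required keys to the set of record ids (count of empty lines seen) in which it occurs, with the answer computed as the size of the 7-way intersection of those sets; no per-record key set or subset/missing-keys test exists in B.
import Mathlib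
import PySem

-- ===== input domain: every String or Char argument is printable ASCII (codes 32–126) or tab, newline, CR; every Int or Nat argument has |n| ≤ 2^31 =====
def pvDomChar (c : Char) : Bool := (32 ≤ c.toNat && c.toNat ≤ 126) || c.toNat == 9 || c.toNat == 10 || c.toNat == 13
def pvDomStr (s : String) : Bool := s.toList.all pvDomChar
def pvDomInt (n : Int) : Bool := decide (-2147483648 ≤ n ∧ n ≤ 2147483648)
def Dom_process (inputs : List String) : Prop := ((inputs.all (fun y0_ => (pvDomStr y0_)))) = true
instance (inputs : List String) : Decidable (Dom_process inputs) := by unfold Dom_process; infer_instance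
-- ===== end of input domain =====

-- B computes the count by a different algorithm: an inverted index from each required key to
-- the set of record ids containing it, the answer being the size of the 7-way intersection —
-- no per-record key set, no missing-keys/cid test (objective: alternative, same cost).


-- ===== PORT A =====
-- s.split(sep) for a non-empty literal sep (split? is none only for sep = ""), exact here
def pvSplit (s sep : String) : List String := (PySem.Str.split? s sep).getD []

def pvValidKeys : List String := ["byr", "iyr", "eyr", "hgt", "hcl", "ecl", "pid", "cid"]

-- the body of A's 'for line in inputs' loop, state = (valid_count, found_keys)
def pvStepA (st : Int × List String) (line : String) : Int × List String :=
  let parts := pvSplit line " "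
  if PySem.Str.len line == 0 then
    let c :=
      if st.2.length > 0 then
        let missing := PySem.Set.diff (PySem.Set.ofList pvValidKeys) (PySem.Set.ofList st.2)
        -- missing_keys[0] is read only under 'len(missing_keys) == 1', so headD is exact there
        if missing.length == 0 || (missing.length == 1 && missing.headD "" == "cid") then
          st.1 + 1
        else st.1
      else st.1
    (c, ([] : List String))
  else
    (st.1, parts.foldl (fun acc kv => acc ++ [(pvSplit kv ":").headD ""]) st.2)

def process (inputs : List String) : Int :=
  ((inputs ++ [""]).foldl pvStepA (0, ([] : List String))).1

-- ===== PORT B =====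
def pvRequired : List String := ["byr", "iyr", "eyr", "hgt", "hcl", "ecl", "pid"]

-- {k: set() for k in REQUIRED}
def pvOcc0 : PySem.Dict String (PySem.Set Int) :=
  pvRequired.foldl (fun d k => d.insert k PySem.Set.empty) PySem.Dict.empty

-- B's indexing loop body, state = (occ, block)
def pvStepB (st : PySem.Dict String (PySem.Set Int) × Int) (line : String) :
    PySem.Dict String (PySem.Set Int) × Int :=
  if PySem.Str.len line == 0 then (st.1, st.2 + 1)
  else
    ((pvSplit line " ").foldl
      (fun d tok =>
        let k := (pvSplit tok ":").headD ""
        if d.contains k then d.modify k PySem.Set.empty (fun s => PySem.Set.add s st.2) else d)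
      st.1, st.2)

-- B's intersection loop: common = occ[REQUIRED[0]]; for k in REQUIRED[1:]: common = common & occ[k]
-- (occ[k] always has the key, so getD with the empty set is exact here)
def pvInterOf (occ : PySem.Dict String (PySem.Set Int)) : PySem.Set Int :=
  pvRequired.tail.foldl (fun c k => PySem.Set.inter c (occ.getD k PySem.Set.empty))
    (occ.getD "byr" PySem.Set.empty)

def process_alt (inputs : List String) : Int :=
  let st := inputs.foldl pvStepB (pvOcc0, 0)
  ((pvInterOf st.1).length : Int)

-- ===== PRECONDITION & SPEC =====
def Spec_process (inputs : List String) (out : Int) : Prop := out = process_alt inputs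
instance (inputs : List String) (out : Int) : Decidable (Spec_process inputs out) := by unfold Spec_process; infer_instance

-- ===== CLAIM (what is proved, stated in full; the proofs are below) =====
def Claim_equal_process : Prop := ∀ (inputs : List String), Dom_process inputs → Spec_process inputs (process inputs)

-- ===== LEMMAS AND PROOFS =====

-- the set occ associates to key k
def pvG (occ : PySem.Dict String (PySem.Set Int)) (k : String) : List Int :=
  occ.getD k PySem.Set.empty

-- loop invariant tying A's (found_keys) to B's (occ, block)
def pvInv (found : List String) (occ : PySem.Dict String (PySem.Set Int)) (b : Int) : Prop :=
  (∀ k ∈ pvRequired, occ.contains k = true) ∧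
  (∀ k ∈ pvRequired, ∀ i ∈ pvG occ k, i ≤ b) ∧
  (∀ k ∈ pvRequired, (b ∈ pvG occ k ↔ k ∈ found)) ∧
  (pvG occ "byr").Nodup

-- A's missing-keys test equals the 'all required keys present' test
lemma pv_filter_keys (p : String → Bool) :
    ((List.filter (fun x => !p x) pvValidKeys).length == 0
      || ((List.filter (fun x => !p x) pvValidKeys).length == 1
          && (List.filter (fun x => !p x) pvValidKeys).headD "" == "cid"))
    = pvRequired.all p := by
  by_cases h1 : p "byr" <;> by_cases h2 : p "iyr" <;> by_cases h3 : p "eyr" <;>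
    by_cases h4 : p "hgt" <;> by_cases h5 : p "hcl" <;> by_cases h6 : p "ecl" <;>
    by_cases h7 : p "pid" <;> by_cases h8 : p "cid" <;>
    simp [pvValidKeys, pvRequired, List.filter, List.all, h1, h2, h3, h4, h5, h6, h7, h8]

lemma pv_contains_ofList (found : List String) :
    (fun x => (PySem.Set.ofList found).contains x) = (fun x => found.contains x) := by
  funext x; simp [PySem.Set.contains, PySem.Set.mem_ofList]

lemma pv_cond_eq (found : List String) :
    (let missing := PySem.Set.diff (PySem.Set.ofList pvValidKeys) (PySem.Set.ofList found);
     (missing.length == 0 || (missing.length == 1 && missing.headD "" == "cid")))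
    = pvRequired.all (fun k => found.contains k) := by
  have hv : PySem.Set.ofList pvValidKeys = pvValidKeys :=
    PySem.Set.ofList_eq_self_of_nodup _ (by decide)
  show ((PySem.Set.diff (PySem.Set.ofList pvValidKeys) (PySem.Set.ofList found)).length == 0
      || _) = _
  rw [PySem.Set.diff, hv]
  simp only [pv_contains_ofList found]
  exact pv_filter_keys (fun x => found.contains x)

-- flushing a block adds 1 exactly when every required key was found
lemma pv_flush (c : Int) (found : List String) (line : String)
    (h : (PySem.Str.len line == 0) = true) :
    pvStepA (c, found) line
    = (c + (if pvRequired.all (fun k => found.contains k) then 1 else 0),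
       ([] : List String)) := by
  have hc := pv_cond_eq found
  rcases found with _ | ⟨a, t⟩
  · simp only [pvStepA, h, if_true]
    have hfalse : (pvRequired.all fun k => ([] : List String).contains k) = false := by decide
    simp only [hfalse, List.length_nil]
    simp
  · simp only [pvStepA, h, if_true]
    simp only at hc
    rw [hc]
    cases hs : pvRequired.all (fun k => (a :: t).contains k) <;> simp


-- B's intersection fold is a filter of the first set
lemma pv_foldl_inter (G : String → List Int) (ks : List String) (s : List Int) :
    ks.foldl (fun c k => PySem.Set.inter c (G k)) s
    = s.filter (fun i => ks.all (fun k => (G k).contains i)) := by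
  induction ks generalizing s with
  | nil => simp
  | cons k ks ih =>
    rw [List.foldl_cons, ih]
    simp only [PySem.Set.inter, PySem.Set.contains, List.filter_filter, List.all_cons]
    exact List.filter_congr (fun i _ => by rw [Bool.and_comm])

lemma pvInter_eq (occ : PySem.Dict String (PySem.Set Int)) :
    pvInterOf occ
    = (pvG occ "byr").filter (fun i => pvRequired.all (fun k => (pvG occ k).contains i)) := by
  have h := pv_foldl_inter (fun k => occ.getD k PySem.Set.empty) pvRequired.tail
    (occ.getD "byr" PySem.Set.empty)
  rw [pvInterOf, h]
  refine List.filter_congr (fun i hi => ?_)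
  have hb : (pvG occ "byr").contains i = true := by
    simpa [List.contains_iff_mem, pvG] using hi
  show (pvRequired.tail).all _ = pvRequired.all _
  rw [show pvRequired = "byr" :: pvRequired.tail from rfl, List.all_cons]
  simp [pvG] at hb ⊢
  intro _; exact hb

lemma pv_mem_inter (occ : PySem.Dict String (PySem.Set Int)) (i : Int) :
    i ∈ pvInterOf occ ↔ ∀ k ∈ pvRequired, i ∈ pvG occ k := by
  rw [pvInter_eq]
  simp only [List.mem_filter, List.all_eq_true, List.contains_iff_mem]
  constructor
  · exact fun h => h.2
  · exact fun h => ⟨h "byr" (by decide), h⟩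

lemma pv_nodup_inter (occ : PySem.Dict String (PySem.Set Int))
    (h : (pvG occ "byr").Nodup) : (pvInterOf occ).Nodup := by
  rw [pvInter_eq]; exact h.filter _

-- a duplicate-free list of values all ≤ b splits into values < b plus possibly b itself
lemma pv_count_split (l : List Int) (b : Int) (hnd : l.Nodup) (hle : ∀ i ∈ l, i ≤ b) :
    (l.length : Int)
    = ((l.filter (fun i => decide (i < b))).length : Int) + (if b ∈ l then 1 else 0) := by
  induction l with
  | nil => simp
  | cons a t ih =>
    obtain ⟨hab, hndt⟩ := List.nodup_cons.mp hnd
    have hat : ∀ i ∈ t, i ≤ b := fun i hi => hle i (List.mem_cons_of_mem _ hi)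
    by_cases hb : a = b
    · subst hb
      have hft : t.filter (fun i => decide (i < a)) = t :=
        List.filter_eq_self.mpr (fun i hi => by
          have h1 := hat i hi
          have h2 : i ≠ a := fun e => hab (e ▸ hi)
          simp; omega)
      simp [hab, hft]
    · have hal : a < b := lt_of_le_of_ne (hle a (List.mem_cons_self)) hb
      have hmem : (b ∈ a :: t) ↔ b ∈ t := by
        constructor
        · intro hx
          rcases List.mem_cons.mp hx with e | e
          · exact absurd e.symm hb
          · exact e
        · exact List.mem_cons_of_mem a
      have hih := ih hndt hat
      rw [List.filter_cons_of_pos (by simpa using hal)]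
      simp only [List.length_cons, hmem]
      split_ifs at hih ⊢ <;> push_cast at hih ⊢ <;> omega

-- the body of B's token loop
def pvTok (b : Int) (d : PySem.Dict String (PySem.Set Int)) (tok : String) :
    PySem.Dict String (PySem.Set Int) :=
  let k := (pvSplit tok ":").headD ""
  if d.contains k then d.modify k PySem.Set.empty (fun s => PySem.Set.add s b) else d

lemma pvStepB_zero (occ : PySem.Dict String (PySem.Set Int)) (b : Int) (l : String)
    (h : (PySem.Str.len l == 0) = true) : pvStepB (occ, b) l = (occ, b + 1) := by
  simp only [pvStepB, h, if_true]

lemma pvStepB_pos (occ : PySem.Dict String (PySem.Set Int)) (b : Int) (l : String)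
    (h : (PySem.Str.len l == 0) = false) :
    pvStepB (occ, b) l = ((pvSplit l " ").foldl (pvTok b) occ, b) := by
  simp only [pvStepB, h, Bool.false_eq_true, if_false]
  rfl

-- one token of B preserves the invariant and the already-closed part of the intersection
lemma pv_tok_pres (found : List String) (occ : PySem.Dict String (PySem.Set Int)) (b : Int)
    (tok : String) (h : pvInv found occ b) :
    pvInv (found ++ [(pvSplit tok ":").headD ""]) (pvTok b occ tok) b ∧
    (pvInterOf (pvTok b occ tok)).filter (fun i => decide (i < b))
      = (pvInterOf occ).filter (fun i => decide (i < b)) := by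
  obtain ⟨h1, h2, h3, h4⟩ := h
  set k := (pvSplit tok ":").headD "" with hk
  by_cases hc : occ.contains k = true
  · have hocc : pvTok b occ tok = occ.insert k (PySem.Set.add (pvG occ k) b) := by
      simp only [pvTok, ← hk, hc, if_true, PySem.Dict.modify]; rfl
    have hG : ∀ k', pvG (pvTok b occ tok) k'
        = if k' = k then PySem.Set.add (pvG occ k) b else pvG occ k' := by
      intro k'; rw [hocc, pvG, PySem.Dict.getD_insert]; rfl
    have hGmem : ∀ (k' : String) (i : Int), i ≠ b →
        (i ∈ pvG (pvTok b occ tok) k' ↔ i ∈ pvG occ k') := by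
      intro k' i hib
      rw [hG k']
      split_ifs with he
      · subst he; rw [PySem.Set.mem_add]; simp [hib]
      · rfl
    refine ⟨⟨?_, ?_, ?_, ?_⟩, ?_⟩
    · intro k' hk'
      rw [hocc, PySem.Dict.contains_insert, h1 k' hk', Bool.or_true]
    · intro k' hk' i hi
      rw [hG k'] at hi
      split_ifs at hi with he
      · rcases (PySem.Set.mem_add _ _ _).mp hi with hi' | hi'
        · exact h2 k' hk' i (he ▸ hi')
        · omega
      · exact h2 k' hk' i hi
    · intro k' hk'
      rw [hG k']
      split_ifs with he
      · subst he
        simp [PySem.Set.mem_add]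
      · rw [h3 k' hk']
        simp [List.mem_append]
        intro e; exact absurd e he
    · rw [hG "byr"]
      split_ifs with he
      · exact PySem.Set.nodup_add _ _ (he ▸ h4)
      · exact h4
    · -- the part of the intersection below b is unchanged
      rw [pvInter_eq, pvInter_eq, List.filter_filter, List.filter_filter]
      have hs1 : pvG (pvTok b occ tok) "byr" = pvG occ "byr" ∨
          pvG (pvTok b occ tok) "byr" = pvG occ "byr" ++ [b] := by
        rw [hG "byr"]
        split_ifs with he
        · rw [← he]
          rw [PySem.Set.add]
          split_ifs with hcb
          · exact Or.inl rfl
          · exact Or.inr rfl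
        · exact Or.inl rfl
      have hptw : ∀ i ∈ pvG occ "byr",
          ((decide (i < b)) && pvRequired.all (fun k' => (pvG (pvTok b occ tok) k').contains i))
          = ((decide (i < b)) && pvRequired.all (fun k' => (pvG occ k').contains i)) := by
        intro i _
        by_cases hib : i < b
        · have hne : i ≠ b := by omega
          simp only [hib, decide_true, Bool.true_and]
          rw [Bool.eq_iff_iff]
          simp only [List.all_eq_true, List.contains_iff_mem]
          constructor
          · intro hall k' hk'; exact (hGmem k' i hne).mp (hall k' hk')
          · intro hall k' hk'; exact (hGmem k' i hne).mpr (hall k' hk')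
        · simp [hib]
      rcases hs1 with he | he
      · rw [he]
        exact List.filter_congr hptw
      · rw [he, List.filter_append]
        have hb : (List.filter (fun i => decide (i < b)
            && pvRequired.all (fun k' => (pvG (pvTok b occ tok) k').contains i)) [b]) = [] := by
          simp
        rw [hb, List.append_nil]
        exact List.filter_congr hptw
  · have hocc : pvTok b occ tok = occ := by
      simp only [pvTok, ← hk]
      rw [if_neg hc]
    rw [hocc]
    refine ⟨⟨h1, h2, ?_, h4⟩, rfl⟩
    intro k' hk'
    have hne : k' ≠ k := by
      intro e; exact hc (e ▸ h1 k' hk')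
    rw [h3 k' hk']
    simp [List.mem_append]
    intro e; exact absurd e hne

-- one non-empty line of B (a fold of tokens) preserves both facts
lemma pv_line (parts : List String) (found : List String)
    (occ : PySem.Dict String (PySem.Set Int)) (b : Int) (h : pvInv found occ b) :
    pvInv (parts.foldl (fun acc kv => acc ++ [(pvSplit kv ":").headD ""]) found)
          (parts.foldl (pvTok b) occ) b ∧
    (pvInterOf (parts.foldl (pvTok b) occ)).filter (fun i => decide (i < b))
      = (pvInterOf occ).filter (fun i => decide (i < b)) := by
  induction parts generalizing found occ with
  | nil => exact ⟨h, rfl⟩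
  | cons t ts ih =>
    obtain ⟨h1, h2⟩ := pv_tok_pres found occ b t h
    obtain ⟨h3, h4⟩ := ih _ _ h1
    exact ⟨h3, h4.trans h2⟩

lemma pv_b_mem_inter (found : List String) (occ : PySem.Dict String (PySem.Set Int)) (b : Int)
    (h : pvInv found occ b) :
    (if b ∈ pvInterOf occ then (1 : Int) else 0)
    = (if pvRequired.all (fun k => found.contains k) then (1 : Int) else 0) := by
  have : (b ∈ pvInterOf occ) ↔ (pvRequired.all (fun k => found.contains k) = true) := by
    rw [pv_mem_inter]
    simp only [List.all_eq_true, List.contains_iff_mem]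
    constructor
    · intro hall k hk; exact (h.2.2.1 k hk).mp (hall k hk)
    · intro hall k hk; exact (h.2.2.1 k hk).mpr (hall k hk)
  split_ifs with hA hB hB
  · rfl
  · exact absurd (this.mp hA) hB
  · exact absurd (this.mpr hB) hA
  · rfl

-- the main induction: A's running count versus B's growing index
lemma pv_main (lines : List String) (c : Int) (found : List String)
    (occ : PySem.Dict String (PySem.Set Int)) (b : Int) (h : pvInv found occ b) :
    ((lines ++ [""]).foldl pvStepA (c, found)).1
      + (((pvInterOf occ).filter (fun i => decide (i < b))).length : Int)
    = c + ((pvInterOf ((lines.foldl pvStepB (occ, b)).1)).length : Int) := by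
  induction lines generalizing c found occ b with
  | nil =>
    simp only [List.nil_append, List.foldl_cons, List.foldl_nil,
      pv_flush c found "" (by decide)]
    have hnd := pv_nodup_inter occ h.2.2.2
    have hle : ∀ i ∈ pvInterOf occ, i ≤ b := fun i hi =>
      h.2.1 "byr" (by decide) i ((pv_mem_inter occ i).mp hi "byr" (by decide))
    have hsplit := pv_count_split (pvInterOf occ) b hnd hle
    have hb := pv_b_mem_inter found occ b h
    rw [hsplit, ← hb]
    split_ifs <;> omega
  | cons l ls ih =>
    cases hl : (PySem.Str.len l == 0) with
    | true =>
      rw [List.cons_append, List.foldl_cons, pv_flush c found l hl,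
        List.foldl_cons, pvStepB_zero occ b l hl]
      have hinv : pvInv [] occ (b + 1) := by
        obtain ⟨h1, h2, h3, h4⟩ := h
        refine ⟨h1, fun k hk i hi => by have := h2 k hk i hi; omega, fun k hk => ?_, h4⟩
        simp only [List.not_mem_nil, iff_false]
        intro hmem
        have := h2 k hk _ hmem
        omega
      have hfull : (pvInterOf occ).filter (fun i => decide (i < b + 1)) = pvInterOf occ :=
        List.filter_eq_self.mpr (fun i hi => by
          have : i ≤ b := h.2.1 "byr" (by decide) i ((pv_mem_inter occ i).mp hi "byr" (by decide))
          simp; omega)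
      have hnd := pv_nodup_inter occ h.2.2.2
      have hle : ∀ i ∈ pvInterOf occ, i ≤ b := fun i hi =>
        h.2.1 "byr" (by decide) i ((pv_mem_inter occ i).mp hi "byr" (by decide))
      have hsplit := pv_count_split (pvInterOf occ) b hnd hle
      have hb := pv_b_mem_inter found occ b h
      have hih := ih (c + if (pvRequired.all fun k => found.contains k) = true then 1 else 0)
        [] occ (b + 1) hinv
      rw [hfull, hsplit, hb] at hih
      linarith [hih]
    | false =>
      rw [List.cons_append, List.foldl_cons, List.foldl_cons, pvStepB_pos occ b l hl]
      have hA : pvStepA (c, found) l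
          = (c, (pvSplit l " ").foldl (fun acc kv => acc ++ [(pvSplit kv ":").headD ""]) found) := by
        simp only [pvStepA, hl, Bool.false_eq_true, if_false]
      rw [hA]
      obtain ⟨hinv', hfix⟩ := pv_line (pvSplit l " ") found occ b h
      rw [← hfix, ih _ _ _ _ hinv']


-- ===== VERDICT (by name: the statement is the Claim_ definition above) =====
-- every value of the initial index is the empty set
lemma pvG_occ0 (k : String) : pvG pvOcc0 k = [] := by
  have h0 : pvOcc0 = PySem.Dict.mk [("byr", []), ("iyr", []), ("eyr", []), ("hgt", []),
      ("hcl", []), ("ecl", []), ("pid", [])] := by rfl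
  rw [pvG, h0, PySem.Dict.getD_eq_get?_getD]
  simp only [PySem.Dict.get?_mk_cons]
  split_ifs <;> rfl

theorem process_spec : Claim_equal_process := by
  intro inputs _
  unfold Spec_process process process_alt
  have hinv : pvInv [] pvOcc0 0 := by
    refine ⟨by decide, ?_, ?_, ?_⟩
    · intro k _ i hi
      rw [pvG_occ0] at hi
      cases hi
    · intro k _
      rw [pvG_occ0]
      simp
    · rw [pvG_occ0]
      exact List.nodup_nil
  have h := pv_main inputs 0 [] pvOcc0 0 hinv
  have h0 : ((pvInterOf pvOcc0).filter (fun i => decide (i < 0))).length = 0 := by decide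
  rw [h0] at h
  simpa using h
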